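-- pv_equiv track=rewrite | github.com/johnwroge/DSA | Algorithms/mathematical-algorithms/gcd-lcm.py | gcd_polynomial_evaluation
-- ===== SOURCE A (Python) =====
-- from typing import List
--
-- def gcd(a: int, b: int) -> int:
--     """
--     Calculate Greatest Common Divisor using Euclidean algorithm
--     Time Complexity: O(log(min(a, b)))
--     Space Complexity: O(1)
--     """
--     while b:
--         a, b = b, a % b
--     return a
--
-- def gcd_array(arr: List[int]) -> int:
--     """
--     Calculate GCD of entire array
--     """
--     if not arr:
--         return 0
--
--     result = arr[0]
--     for i in range(1, len(arr)):
--         result = gcd(result, arr[i])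
--         if result == 1:  # Early termination
--             break
--
--     return result
--
-- def gcd_polynomial_evaluation(coefficients: List[int], x_values: List[int]) -> int:
--     """
--     Find GCD of polynomial evaluations at different x values
--     """
--     if not coefficients or not x_values:
--         return 0
--
--     def evaluate_polynomial(coeffs: List[int], x: int) -> int:
--         result = 0
--         power = 1
--         for coeff in coeffs:
--             result += coeff * power
--             power *= x
--         return result
--
--     evaluations = [evaluate_polynomial(coefficients, x) for x in x_values]
--     return gcd_array(evaluations)
-- ===== SOURCE B (Python) =====
-- from typing import List
--
--
-- def _gcd(a: int, b: int) -> int: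
--     while b:
--         a, b = b, a % b
--     return a
--
--
-- def gcd_polynomial_evaluation(coefficients: List[int], x_values: List[int]) -> int:
--     if not coefficients or not x_values:
--         return 0
--
--     def horner(x: int) -> int:
--         acc = 0
--         for coeff in reversed(coefficients):
--             acc = acc * x + coeff
--         return acc
--
--     result = horner(x_values[0])
--     for x in x_values[1:]:
--         result = _gcd(result, horner(x))
--         if result == 1:
--             break
--     return result
-- ===== Notes on version B (the rewrite author's own statement) =====
-- stated objective: alternative
-- what changed: Each polynomial is evaluated by Horner's rule (reverse traversal, acc = acc*x + coeff) instead of accumulating ascending powers, and the intermediate list of evaluations is gone: a single streaming loop keeps a running gcd over x_values with the same early break at 1.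
import Mathlib
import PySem

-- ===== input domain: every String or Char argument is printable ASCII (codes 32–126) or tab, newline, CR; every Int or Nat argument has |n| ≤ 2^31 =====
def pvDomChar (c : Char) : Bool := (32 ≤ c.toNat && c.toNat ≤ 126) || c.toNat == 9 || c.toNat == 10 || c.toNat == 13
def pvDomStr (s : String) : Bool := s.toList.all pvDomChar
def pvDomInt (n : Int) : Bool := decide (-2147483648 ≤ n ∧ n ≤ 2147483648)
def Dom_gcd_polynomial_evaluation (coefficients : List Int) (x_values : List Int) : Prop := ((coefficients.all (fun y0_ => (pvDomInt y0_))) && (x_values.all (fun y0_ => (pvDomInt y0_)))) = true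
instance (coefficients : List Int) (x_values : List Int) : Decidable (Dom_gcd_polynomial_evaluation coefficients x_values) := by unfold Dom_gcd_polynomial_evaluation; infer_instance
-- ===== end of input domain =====

-- B replaces A's ascending-power evaluation and intermediate evaluation list by Horner's
-- rule and a single streaming gcd loop over x_values (alternative decomposition, same cost).

-- Termination measure for the Euclidean loop (Python's % : b ≠ 0 → |a % b| < |b|).
theorem pyMod_natAbs_lt (a b : Int) (hb : b ≠ 0) : (PySem.Int.mod a b).natAbs < b.natAbs := by
  rcases lt_or_gt_of_ne hb with h | h
  · have := PySem.Int.mod_neg_bounds a h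
    omega
  · have h1 := PySem.Int.mod_nonneg a h
    have h2 := PySem.Int.mod_lt a h
    omega

-- shared helper: Python's `gcd` (Euclid with Python's `%`), used by both sources
def pyGcd (a b : Int) : Int :=
  if hb : b = 0 then a else pyGcd b (PySem.Int.mod a b)
termination_by b.natAbs
decreasing_by exact pyMod_natAbs_lt a b hb

-- ===== PORT A =====
-- evaluate_polynomial: ascending powers, state (result, power)
def evalPolyA (coeffs : List Int) (x : Int) : Int :=
  (coeffs.foldl (fun (st : Int × Int) coeff => (st.1 + coeff * st.2, st.2 * x)) (0, 1)).1

-- the `for i in range(1, len(arr))` loop of gcd_array, with its early break at 1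
def gcdArrayLoop (result : Int) (rest : List Int) : Int :=
  match rest with
  | [] => result
  | e :: es =>
    let r := pyGcd result e
    if r = 1 then r else gcdArrayLoop r es

def gcd_array (arr : List Int) : Int :=
  match arr with
  | [] => 0
  | a :: rest => gcdArrayLoop a rest

def gcd_polynomial_evaluation (coefficients : List Int) (x_values : List Int) : Int :=
  if coefficients = [] ∨ x_values = [] then 0
  else gcd_array (x_values.map (fun x => evalPolyA coefficients x))

-- ===== PORT B =====
-- Horner's rule: iterate coefficients in reverse, acc = acc * x + coeff
def horner (coefficients : List Int) (x : Int) : Int :=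
  coefficients.reverse.foldl (fun acc coeff => acc * x + coeff) 0

-- streaming gcd over the remaining x values, early break at 1
def streamLoop (coefficients : List Int) (result : Int) (rest : List Int) : Int :=
  match rest with
  | [] => result
  | x :: xs =>
    let r := pyGcd result (horner coefficients x)
    if r = 1 then r else streamLoop coefficients r xs

def gcd_polynomial_evaluation_alt (coefficients : List Int) (x_values : List Int) : Int :=
  if coefficients = [] then 0
  else
    match x_values with
    | [] => 0
    | x :: xs => streamLoop coefficients (horner coefficients x) xs

-- ===== PRECONDITION & SPEC =====
def Spec_gcd_polynomial_evaluation (coefficients : List Int) (x_values : List Int) (out : Int) : Prop := out = gcd_polynomial_evaluation_alt coefficients x_values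
instance (coefficients : List Int) (x_values : List Int) (out : Int) : Decidable (Spec_gcd_polynomial_evaluation coefficients x_values out) := by unfold Spec_gcd_polynomial_evaluation; infer_instance

-- ===== CLAIM (what is proved, stated in full; the proofs are below) =====
def Claim_equal_gcd_polynomial_evaluation : Prop := ∀ (coefficients : List Int) (x_values : List Int), Dom_gcd_polynomial_evaluation coefficients x_values → Spec_gcd_polynomial_evaluation coefficients x_values (gcd_polynomial_evaluation coefficients x_values)

-- ===== LEMMAS AND PROOFS =====
-- reference polynomial value: poly (c::cs) x = c + x * poly cs x
def polyVal (coeffs : List Int) (x : Int) : Int :=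
  match coeffs with
  | [] => 0
  | c :: cs => c + x * polyVal cs x

theorem evalPolyA_foldl (coeffs : List Int) (x r p : Int) :
    (coeffs.foldl (fun (st : Int × Int) coeff => (st.1 + coeff * st.2, st.2 * x)) (r, p)).1
      = r + p * polyVal coeffs x := by
  induction coeffs generalizing r p with
  | nil => simp [polyVal]
  | cons c cs ih => simp [List.foldl, polyVal, ih]; ring

theorem evalPolyA_eq_polyVal (coeffs : List Int) (x : Int) :
    evalPolyA coeffs x = polyVal coeffs x := by
  simpa using evalPolyA_foldl coeffs x 0 1

theorem horner_eq_polyVal (coeffs : List Int) (x : Int) :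
    horner coeffs x = polyVal coeffs x := by
  unfold horner
  rw [List.foldl_reverse]
  induction coeffs with
  | nil => simp [polyVal]
  | cons c cs ih => simp [List.foldr, polyVal, ih]; ring

theorem horner_eq_evalPolyA (coeffs : List Int) (x : Int) :
    horner coeffs x = evalPolyA coeffs x := by
  rw [horner_eq_polyVal, evalPolyA_eq_polyVal]

theorem streamLoop_eq_gcdArrayLoop (coeffs : List Int) (r : Int) (xs : List Int) :
    streamLoop coeffs r xs
      = gcdArrayLoop r (xs.map (fun x => evalPolyA coeffs x)) := by
  induction xs generalizing r with
  | nil => rfl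
  | cons x xs ih =>
    simp only [streamLoop, gcdArrayLoop, List.map, horner_eq_evalPolyA]
    split <;> simp [ih]

-- ===== VERDICT (by name: the statement is the Claim_ definition above) =====
theorem gcd_polynomial_evaluation_spec : Claim_equal_gcd_polynomial_evaluation := by
  intro coefficients x_values _
  unfold Spec_gcd_polynomial_evaluation gcd_polynomial_evaluation gcd_polynomial_evaluation_alt
  by_cases hc : coefficients = []
  · simp [hc]
  · cases x_values with
    | nil => simp [hc]
    | cons x xs =>
      simp only [hc, false_or, if_neg (by simp : ¬ (x :: xs = [])), if_neg hc]
      simp [gcd_array, streamLoop_eq_gcdArrayLoop, horner_eq_evalPolyA]
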